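-- pv_equiv track=rewrite | github.com/buh07/RL-Decoder-using-SAE-Features | phase7/parse_cot_to_states.py | canonical_step_claims
-- ===== SOURCE A (Python) =====
-- from typing import Dict, List, Optional, Tuple
--
-- def canonical_step_claims(parsed: Dict) -> Dict[int, Dict]:
--     """Select one canonical claim per step_idx without discarding earlier claims silently.
--
--     Preference order:
--     1) first non-correction claim in observed text order
--     2) first claim in observed text order (if only correction claims exist)
--     """
--     in_text_order = parsed.get("parsed_steps_in_text_order") or parsed.get("parsed_steps", [])
--     by_idx: Dict[int, List[Dict]] = {}
--     for s in in_text_order: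
--         sidx = int(s.get("step_idx", -1))
--         by_idx.setdefault(sidx, []).append(s)
--     out: Dict[int, Dict] = {}
--     for sidx, claims in by_idx.items():
--         preferred = next((c for c in claims if not bool(c.get("is_correction", False))), None)
--         out[sidx] = preferred if preferred is not None else claims[0]
--     return out
-- ===== SOURCE B (Python) =====
-- def canonical_step_claims(parsed):
--     """One fused pass: keep the current winner per step_idx in `out` and a set
--     `finalized` of indices already holding a non-correction claim."""
--     in_text_order = parsed.get("parsed_steps_in_text_order") or parsed.get("parsed_steps", [])
--     out = {}
--     finalized = set()
--     for s in in_text_order: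
--         sidx = int(s.get("step_idx", -1))
--         if sidx not in out:
--             out[sidx] = s
--             if not bool(s.get("is_correction", False)):
--                 finalized.add(sidx)
--         elif sidx not in finalized and not bool(s.get("is_correction", False)):
--             out[sidx] = s
--             finalized.add(sidx)
--     return out
-- ===== Notes on version B (the rewrite author's own statement) =====
-- stated objective: alternative
-- what changed: Replaces A's two phases (group all claims into per-index lists, then pick a preferred claim from each list) with one fused pass that keeps only the current winner per step_idx plus a 'finalized' set of indices already holding a non-correction claim, never materialising the per-index lists.
import Mathlib
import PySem

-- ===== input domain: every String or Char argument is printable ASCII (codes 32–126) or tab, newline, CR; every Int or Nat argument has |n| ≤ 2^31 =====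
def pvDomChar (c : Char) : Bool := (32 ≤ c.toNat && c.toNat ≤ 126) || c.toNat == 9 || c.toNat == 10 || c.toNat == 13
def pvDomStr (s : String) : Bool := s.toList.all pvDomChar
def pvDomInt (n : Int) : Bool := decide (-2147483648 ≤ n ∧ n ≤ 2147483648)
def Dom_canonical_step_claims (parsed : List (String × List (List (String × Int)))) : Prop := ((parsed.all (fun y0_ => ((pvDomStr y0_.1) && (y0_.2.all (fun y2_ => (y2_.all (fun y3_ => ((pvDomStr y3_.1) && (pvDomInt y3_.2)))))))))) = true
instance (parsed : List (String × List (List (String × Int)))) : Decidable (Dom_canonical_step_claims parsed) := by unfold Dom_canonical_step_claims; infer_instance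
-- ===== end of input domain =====

-- B changes the decomposition only: one fused pass (winner dict + finalized set) instead of
-- A's group-into-lists phase followed by a selection phase; same asymptotic cost.

-- ===== PORT A =====
-- shared with port B: both Pythons contain these identical expressions
-- in_text_order = parsed.get("parsed_steps_in_text_order") or parsed.get("parsed_steps", [])
def pvInTextOrder (parsed : List (String × List (List (String × Int)))) : List (List (String × Int)) :=
  match (PySem.Dict.mk parsed).get? "parsed_steps_in_text_order" with
  | some l => if l.isEmpty then (PySem.Dict.mk parsed).getD "parsed_steps" [] else l
  | none => (PySem.Dict.mk parsed).getD "parsed_steps" []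

-- int(s.get("step_idx", -1))
def pvStepIdx (s : List (String × Int)) : Int := (PySem.Dict.mk s).getD "step_idx" (-1)

-- not bool(c.get("is_correction", False))
def pvNonCorr (c : List (String × Int)) : Bool := !((PySem.Dict.mk c).getD "is_correction" 0 != 0)

def canonical_step_claims (parsed : List (String × List (List (String × Int)))) : List (Int × List (String × Int)) :=
  let in_text_order := pvInTextOrder parsed
  -- by_idx.setdefault(sidx, []).append(s)  ==  by_idx[sidx] = by_idx.get(sidx, []) + [s]
  let by_idx : PySem.Dict Int (List (List (String × Int))) :=
    in_text_order.foldl (fun d s => d.modify (pvStepIdx s) [] (· ++ [s])) PySem.Dict.empty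
  let out : PySem.Dict Int (List (String × Int)) :=
    by_idx.items.foldl
      (fun o p =>
        match p.2.find? (fun c => pvNonCorr c) with
        | some c => o.insert p.1 c
        | none => o.insert p.1 (PySem.List.pyGetD p.2 0 []))
      PySem.Dict.empty
  out.items

-- ===== PORT B =====
def canonical_step_claims_alt (parsed : List (String × List (List (String × Int)))) : List (Int × List (String × Int)) :=
  let in_text_order := pvInTextOrder parsed
  let st :=
    in_text_order.foldl
      (fun (st : PySem.Dict Int (List (String × Int)) × PySem.Set Int) s =>
        let sidx := pvStepIdx s
        if !st.1.contains sidx then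
          (st.1.insert sidx s, if pvNonCorr s then PySem.Set.add st.2 sidx else st.2)
        else if !(PySem.Set.contains st.2 sidx) && pvNonCorr s then
          (st.1.insert sidx s, PySem.Set.add st.2 sidx)
        else st)
      (PySem.Dict.empty, PySem.Set.empty)
  st.1.items

-- ===== PRECONDITION & SPEC =====
def Spec_canonical_step_claims (parsed : List (String × List (List (String × Int)))) (out : List (Int × List (String × Int))) : Prop := out = canonical_step_claims_alt parsed
instance (parsed : List (String × List (List (String × Int)))) (out : List (Int × List (String × Int))) : Decidable (Spec_canonical_step_claims parsed out) := by unfold Spec_canonical_step_claims; infer_instance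

-- ===== CLAIM (what is proved, stated in full; the proofs are below) =====
def Claim_equal_canonical_step_claims : Prop := ∀ (parsed : List (String × List (List (String × Int)))), Dom_canonical_step_claims parsed → Spec_canonical_step_claims parsed (canonical_step_claims parsed)

-- ===== LEMMAS AND PROOFS =====

-- the value A's second phase selects from a per-index claim list
def pvSel (cs : List (List (String × Int))) : List (String × Int) :=
  match cs.find? (fun c => pvNonCorr c) with
  | some c => c
  | none => PySem.List.pyGetD cs 0 []

-- A's grouping step and B's fused step, named for the proofs (definitionally the ports' lambdas)
def pvStepA (d : PySem.Dict Int (List (List (String × Int)))) (s : List (String × Int)) :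
    PySem.Dict Int (List (List (String × Int))) :=
  d.modify (pvStepIdx s) [] (· ++ [s])

def pvStepB (st : PySem.Dict Int (List (String × Int)) × PySem.Set Int) (s : List (String × Int)) :
    PySem.Dict Int (List (String × Int)) × PySem.Set Int :=
  if !st.1.contains (pvStepIdx s) then
    (st.1.insert (pvStepIdx s) s, if pvNonCorr s then PySem.Set.add st.2 (pvStepIdx s) else st.2)
  else if !(PySem.Set.contains st.2 (pvStepIdx s)) && pvNonCorr s then
    (st.1.insert (pvStepIdx s) s, PySem.Set.add st.2 (pvStepIdx s))
  else st

lemma pv_sel_singleton (s : List (String × Int)) : pvSel [s] = s := by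
  unfold pvSel
  cases h : ([s].find? (fun c => pvNonCorr c)) with
  | none => simp [PySem.List.pyGetD]
  | some c => simp [List.find?_singleton] at h; exact h.2.symm

lemma pv_sel_append_isSome (cs : List (List (String × Int))) (s : List (String × Int))
    (h : (cs.find? (fun c => pvNonCorr c)).isSome) : pvSel (cs ++ [s]) = pvSel cs := by
  obtain ⟨c, hc⟩ := Option.isSome_iff_exists.mp h
  unfold pvSel
  rw [List.find?_append, hc]
  rfl

lemma pv_sel_append_none (cs : List (List (String × Int))) (s : List (String × Int))
    (h0 : cs ≠ []) (h : cs.find? (fun c => pvNonCorr c) = none) :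
    pvSel (cs ++ [s]) = if pvNonCorr s then s else pvSel cs := by
  unfold pvSel
  rw [List.find?_append, h, Option.none_or, List.find?_singleton]
  cases hn : pvNonCorr s with
  | true => simp
  | false =>
    simp only [Bool.false_eq_true, if_false]
    cases cs with
    | nil => exact absurd rfl h0
    | cons c t => simp [PySem.List.pyGetD]

lemma pv_keys_eq (d : PySem.Dict Int (List (List (String × Int))))
    (o : PySem.Dict Int (List (String × Int)))
    (H1 : o.items = d.items.map (fun p => (p.1, pvSel p.2))) : o.keys = d.keys := by
  show o.items.map (·.1) = d.items.map (·.1)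
  rw [H1, List.map_map]
  rfl

lemma pv_main (l : List (List (String × Int)))
    (d : PySem.Dict Int (List (List (String × Int))))
    (o : PySem.Dict Int (List (String × Int))) (f : PySem.Set Int)
    (H1 : o.items = d.items.map (fun p => (p.1, pvSel p.2)))
    (H2 : d.keys.Nodup)
    (H3 : ∀ p ∈ d.items, p.2 ≠ [])
    (H4 : ∀ k, k ∈ f ↔ ∃ cs, d.get? k = some cs ∧ (cs.find? (fun c => pvNonCorr c)).isSome) :
    ((l.foldl pvStepA d).items).map (fun p => (p.1, pvSel p.2))
      = (l.foldl pvStepB (o, f)).1.items := by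
  induction l generalizing d o f with
  | nil => simpa using H1.symm
  | cons s t ih =>
    rw [List.foldl_cons, List.foldl_cons]
    have hoc : o.contains (pvStepIdx s) = d.contains (pvStepIdx s) := by
      rw [PySem.Dict.contains_eq_decide_mem_keys, PySem.Dict.contains_eq_decide_mem_keys,
        pv_keys_eq d o H1]
    by_cases hc : d.contains (pvStepIdx s) = true
    · -- key already present
      obtain ⟨cs, hg⟩ : ∃ cs, d.get? (pvStepIdx s) = some cs := by
        rw [PySem.Dict.contains_eq_isSome_get?] at hc
        exact Option.isSome_iff_exists.mp hc
      have hgd : d.getD (pvStepIdx s) [] = cs := PySem.Dict.getD_of_get?_eq_some d _ hg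
      have hA : pvStepA d s = d.insert (pvStepIdx s) (cs ++ [s]) := by
        show d.insert (pvStepIdx s) (d.getD (pvStepIdx s) [] ++ [s]) = _
        rw [hgd]
      have hcs0 : cs ≠ [] := H3 _ (PySem.Dict.mem_items_of_get?_eq_some d hg)
      have hitems : (d.insert (pvStepIdx s) (cs ++ [s])).items
          = d.items.map (fun p => if (p.1 == pvStepIdx s) = true then (pvStepIdx s, cs ++ [s]) else p) :=
        PySem.Dict.items_insert_of_contains d _ hc
      have hkeys' : (d.insert (pvStepIdx s) (cs ++ [s])).keys = d.keys :=
        PySem.Dict.keys_insert_of_contains d _ hc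
      have hval : ∀ p ∈ d.items, p.1 = pvStepIdx s → p.2 = cs := by
        intro p hp hpk
        have hmem : (p.1, p.2) ∈ d.items := hp
        have := PySem.Dict.get?_of_mem_items d hmem H2
        rw [hpk, hg] at this
        exact Option.some.inj this.symm
      have hmemf : (pvStepIdx s ∈ f) ↔ (cs.find? (fun c => pvNonCorr c)).isSome := by
        rw [H4]
        constructor
        · rintro ⟨cs', hg', hs'⟩; rw [hg] at hg'; cases hg'; exact hs'
        · intro hs'; exact ⟨cs, hg, hs'⟩
      have hval3 : ∀ p ∈ (d.insert (pvStepIdx s) (cs ++ [s])).items, p.2 ≠ [] := by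
        intro p hp
        rw [hitems] at hp
        obtain ⟨q, hq, hqe⟩ := List.mem_map.mp hp
        by_cases hqk : (q.1 == pvStepIdx s) = true
        · rw [if_pos hqk] at hqe; rw [← hqe]; simp [hcs0]
        · rw [if_neg hqk] at hqe; rw [← hqe]; exact H3 q hq
      by_cases hf : pvStepIdx s ∈ f
      · -- a non-correction claim is already recorded: both sides keep their choice
        have hsome : (cs.find? (fun c => pvNonCorr c)).isSome := hmemf.mp hf
        have hB : pvStepB (o, f) s = (o, f) := by
          unfold pvStepB
          rw [if_neg (by simp [hoc, hc]), if_neg (by simp [hf])]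
        rw [hA, hB]
        apply ih
        · rw [H1, hitems, List.map_map]
          apply (List.map_congr_left _).symm
          intro p hp
          by_cases hpk : (p.1 == pvStepIdx s) = true
          · have hpe : p.1 = pvStepIdx s := beq_iff_eq.mp hpk
            have hp2 : p.2 = cs := hval p hp hpe
            simp [hpe, hp2, pv_sel_append_isSome cs s hsome]
          · have hpe : ¬ p.1 = pvStepIdx s := by simpa using hpk
            simp [hpe]
        · rw [hkeys']; exact H2
        · exact hval3
        · intro k
          rw [H4]
          by_cases hk : k = pvStepIdx s
          · subst hk
            rw [PySem.Dict.get?_insert]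
            rw [if_pos rfl]
            obtain ⟨c, hcf⟩ := Option.isSome_iff_exists.mp hsome
            constructor
            · rintro ⟨cs', hg', hs'⟩
              exact ⟨cs ++ [s], rfl, by rw [List.find?_append, hcf]; rfl⟩
            · intro _; exact ⟨cs, hg, hsome⟩
          · rw [PySem.Dict.get?_insert, if_neg hk]
      · -- no non-correction claim yet for this index
        have hnone : cs.find? (fun c => pvNonCorr c) = none := by
          cases h' : cs.find? (fun c => pvNonCorr c) with
          | none => rfl
          | some c => exact absurd (hmemf.mpr (by rw [h']; rfl)) hf
        by_cases hn : pvNonCorr s = true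
        · -- overwrite with the first non-correction claim
          have hB : pvStepB (o, f) s
              = (o.insert (pvStepIdx s) s, PySem.Set.add f (pvStepIdx s)) := by
            unfold pvStepB
            rw [if_neg (by simp [hoc, hc]), if_pos (by simp [hf, hn])]
          rw [hA, hB]
          apply ih
          · rw [PySem.Dict.items_insert_of_contains o (k := pvStepIdx s) s (by rw [hoc]; exact hc),
              H1, hitems, List.map_map, List.map_map]
            apply List.map_congr_left
            intro p hp
            by_cases hpk : (p.1 == pvStepIdx s) = true
            · have hpe : p.1 = pvStepIdx s := beq_iff_eq.mp hpk
              have hp2 : p.2 = cs := hval p hp hpe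
              simp [hpe, pv_sel_append_none cs s hcs0 hnone, hn]
            · have hpe : ¬ p.1 = pvStepIdx s := by simpa using hpk
              simp [hpe]
          · rw [hkeys']; exact H2
          · exact hval3
          · intro k
            rw [PySem.Set.mem_add]
            by_cases hk : k = pvStepIdx s
            · subst hk
              rw [PySem.Dict.get?_insert]
              rw [if_pos rfl]
              constructor
              · intro _
                refine ⟨cs ++ [s], rfl, ?_⟩
                rw [List.find?_append, hnone, Option.none_or, List.find?_singleton, if_pos hn]
                rfl
              · intro _; simp
            · rw [PySem.Dict.get?_insert, if_neg hk, H4]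
              constructor
              · rintro (h | h)
                · exact h
                · exact absurd h hk
              · exact Or.inl
        · -- a correction claim: both sides ignore it
          have hB : pvStepB (o, f) s = (o, f) := by
            unfold pvStepB
            rw [if_neg (by simp [hoc, hc]), if_neg (by simp [hn])]
          rw [hA, hB]
          apply ih
          · rw [H1, hitems, List.map_map]
            apply (List.map_congr_left _).symm
            intro p hp
            by_cases hpk : (p.1 == pvStepIdx s) = true
            · have hpe : p.1 = pvStepIdx s := beq_iff_eq.mp hpk
              have hp2 : p.2 = cs := hval p hp hpe
              simp [hpe, hp2, pv_sel_append_none cs s hcs0 hnone, hn]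
            · have hpe : ¬ p.1 = pvStepIdx s := by simpa using hpk
              simp [hpe]
          · rw [hkeys']; exact H2
          · exact hval3
          · intro k
            by_cases hk : k = pvStepIdx s
            · subst hk
              rw [H4, PySem.Dict.get?_insert]
              rw [if_pos rfl]
              constructor
              · rintro ⟨cs', hg', hs'⟩; rw [hg] at hg'; cases hg'
                rw [hnone] at hs'; simp at hs'
              · rintro ⟨cs', he, hs'⟩
                cases he
                rw [List.find?_append, hnone, Option.none_or, List.find?_singleton,
                  if_neg hn] at hs'
                simp at hs'
            · rw [H4, PySem.Dict.get?_insert, if_neg hk]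
    · -- fresh key
      have hc' : d.contains (pvStepIdx s) = false := Bool.eq_false_iff.mpr hc
      have hgd : d.getD (pvStepIdx s) [] = [] := PySem.Dict.getD_of_not_contains d _ hc'
      have hnf : pvStepIdx s ∉ f := by
        rw [H4]
        rintro ⟨cs, hg, -⟩
        rw [PySem.Dict.contains_eq_isSome_get?, hg] at hc'
        simp at hc'
      have hA : pvStepA d s = d.insert (pvStepIdx s) [s] := by
        show d.insert (pvStepIdx s) (d.getD (pvStepIdx s) [] ++ [s]) = _
        rw [hgd, List.nil_append]
      have hB : pvStepB (o, f) s
          = (o.insert (pvStepIdx s) s,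
             if pvNonCorr s then PySem.Set.add f (pvStepIdx s) else f) := by
        unfold pvStepB
        rw [if_pos (by simp [hoc, hc'])]
      rw [hA, hB]
      apply ih
      · rw [PySem.Dict.items_insert_of_not_contains o s (by rw [hoc]; exact hc'),
          PySem.Dict.items_insert_of_not_contains d [s] hc', H1, List.map_append]
        simp [pv_sel_singleton]
      · rw [PySem.Dict.keys_insert_of_not_contains d _ hc']
        refine List.nodup_append.mpr ⟨H2, List.nodup_singleton _, ?_⟩
        intro a ha b hb
        rw [List.mem_singleton] at hb
        subst hb
        intro heq
        rw [PySem.Dict.contains_eq_decide_mem_keys] at hc'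
        simp at hc'
        exact hc' (heq ▸ ha)
      · intro p hp
        rw [PySem.Dict.items_insert_of_not_contains d [s] hc'] at hp
        rcases List.mem_append.mp hp with h | h
        · exact H3 p h
        · rw [List.mem_singleton] at h; rw [h]; simp
      · intro k
        by_cases hk : k = pvStepIdx s
        · subst hk
          rw [PySem.Dict.get?_insert]
          rw [if_pos rfl]
          cases hn : pvNonCorr s with
          | true =>
            rw [if_pos rfl, PySem.Set.mem_add]
            constructor
            · intro _
              exact ⟨[s], rfl, by rw [List.find?_singleton, if_pos hn]; rfl⟩
            · intro _; simp
          | false =>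
            rw [if_neg (by simp)]
            constructor
            · intro h; exact absurd h hnf
            · rintro ⟨cs', he, hs'⟩
              cases he
              rw [List.find?_singleton, if_neg (by simp [hn])] at hs'
              simp at hs'
        · cases hn : pvNonCorr s with
          | true =>
            rw [if_pos rfl, PySem.Set.mem_add, H4, PySem.Dict.get?_insert, if_neg hk]
            constructor
            · rintro (h | h)
              · exact h
              · exact absurd h hk
            · exact Or.inl
          | false =>
            rw [if_neg (by simp), PySem.Dict.get?_insert, if_neg hk]
            exact H4 k

-- ===== VERDICT (by name: the statement is the Claim_ definition above) =====
theorem canonical_step_claims_spec : Claim_equal_canonical_step_claims := by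
  intro parsed _
  show canonical_step_claims parsed = canonical_step_claims_alt parsed
  show (((pvInTextOrder parsed).foldl pvStepA PySem.Dict.empty).items.foldl
      (fun o p =>
        match p.2.find? (fun c => pvNonCorr c) with
        | some c => o.insert p.1 c
        | none => o.insert p.1 (PySem.List.pyGetD p.2 0 [])) PySem.Dict.empty).items
    = ((pvInTextOrder parsed).foldl pvStepB (PySem.Dict.empty, PySem.Set.empty)).1.items
  have hstep : (fun (o : PySem.Dict Int (List (String × Int))) (p : Int × List (List (String × Int))) =>
      match p.2.find? (fun c => pvNonCorr c) with
      | some c => o.insert p.1 c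
      | none => o.insert p.1 (PySem.List.pyGetD p.2 0 []))
      = fun o p => o.insert p.1 (pvSel p.2) := by
    funext o p
    unfold pvSel
    cases p.2.find? (fun c => pvNonCorr c) <;> rfl
  rw [hstep]
  set l := pvInTextOrder parsed with hl
  set by_idx := l.foldl pvStepA PySem.Dict.empty with hb
  have hnodup : by_idx.keys.Nodup := by
    rw [hb]
    exact PySem.Dict.nodup_keys_foldl_modify_key l pvStepIdx [] (fun _ s v => v ++ [s])
      PySem.Dict.empty (by simp [PySem.Dict.keys, PySem.Dict.empty])
  rw [PySem.Dict.items_foldl_insert_fresh by_idx.items Prod.fst (fun p => pvSel p.2)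
    PySem.Dict.empty (fun a _ => PySem.Dict.contains_empty a.1) hnodup]
  rw [show (PySem.Dict.empty : PySem.Dict Int (List (String × Int))).items = [] from rfl,
    List.nil_append]
  exact pv_main l PySem.Dict.empty PySem.Dict.empty PySem.Set.empty rfl
    (by simp [PySem.Dict.keys, PySem.Dict.empty]) (by intro p hp; simp [PySem.Dict.empty] at hp)
    (by intro k; simp [PySem.Set.empty, PySem.Dict.get?_empty])
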